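-- pv_equiv track=rewrite | github.com/shaoyuancc/large_gcs | large_gcs/graph/graph.py | _combine_paths
-- ===== SOURCE A (Python) =====
-- def _combine_paths(paths):
--     # Find the longest length in the paths
--     max_length = max(len(path) for path in paths)
--
--     # Pad all paths to have the same length
--     padded_paths = []
--     for path in paths:
--         last_element = path[-1] if path else None
--         padded_path = path + [last_element] * (max_length - len(path))
--         padded_paths.append(padded_path)
--
--     # Transpose the paths to get tuples
--     transposed_paths = list(zip(*padded_paths))
--
--     return transposed_paths
-- ===== SOURCE B (Python) =====
-- def _combine_paths(paths):
--     # Longest path length (same ValueError as A on empty input).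
--     max_length = max(len(path) for path in paths)
--
--     # Build the result column by column, indexing directly instead of
--     # padding every path and transposing.
--     result = []
--     for i in range(max_length):
--         result.append(tuple(
--             path[i] if i < len(path) else (path[-1] if path else None)
--             for path in paths
--         ))
--     return result
-- ===== Notes on version B (the rewrite author's own statement) =====
-- stated objective: alternative
-- what changed: B computes each output column directly by index (path[i] if i < len(path) else the last element) in one loop over range(max_length), eliminating A's padded_paths intermediate list and the zip(*...) transpose.
-- outside the precondition, e.g. on _combine_paths([[], ['a']]): A returns [(None, 'a')], B returns [(None, 'a')]; on _combine_paths([]): A raises ValueError, B raises ValueError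
import Mathlib
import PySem

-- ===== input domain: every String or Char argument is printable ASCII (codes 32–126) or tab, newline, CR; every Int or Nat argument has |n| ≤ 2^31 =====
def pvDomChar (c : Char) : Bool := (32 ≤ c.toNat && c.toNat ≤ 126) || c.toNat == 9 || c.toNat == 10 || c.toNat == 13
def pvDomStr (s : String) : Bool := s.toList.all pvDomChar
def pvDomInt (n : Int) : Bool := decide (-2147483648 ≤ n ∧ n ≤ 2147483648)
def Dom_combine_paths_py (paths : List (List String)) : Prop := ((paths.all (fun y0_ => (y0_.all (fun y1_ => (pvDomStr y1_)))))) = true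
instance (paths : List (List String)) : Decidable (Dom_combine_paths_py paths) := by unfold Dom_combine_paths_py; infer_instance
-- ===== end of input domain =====

-- B builds each output column directly by index, replacing A's pad-then-zip(*) transpose;
-- objective: alternative decomposition (same cost).

-- ===== PORT A =====
-- Python's zip(*rows): stop at the first exhausted row; zip() of no rows is empty.
def pyZipStar (rows : List (List String)) : List (List String) :=
  match rows with
  | [] => []
  | r :: rs =>
    if (r :: rs).any (·.isEmpty) then []
    else ((r :: rs).map (·.headD "")) :: pyZipStar ((r :: rs).map (·.tail))
termination_by ((fun rows => (rows.headD []).length) rows)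
decreasing_by
  simp only [List.any_cons, Bool.or_eq_true, List.isEmpty_iff, not_or] at *
  cases r with
  | nil => simp_all
  | cons a t => simp

-- literal port of A; the pad element 'path[-1] if path else None' is ported as
-- p.getLastD "" — exact on Pre_ inputs (an empty member path only occurs when
-- max_length = 0 and no padding happens; elsewhere A's output would contain None,
-- which is outside the declared type and excluded by Pre_).
def combine_paths_py (paths : List (List String)) : List (List String) :=
  let max_length : Nat := ((paths.map (·.length)).max?).getD 0
  let padded_paths : List (List String) :=
    paths.map (fun path => path ++ List.replicate (max_length - path.length) (path.getLastD ""))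
  pyZipStar padded_paths

-- ===== PORT B =====
def combine_paths_py_alt (paths : List (List String)) : List (List String) :=
  let max_length : Nat := ((paths.map (·.length)).max?).getD 0
  (List.range max_length).map (fun i =>
    paths.map (fun path => if i < path.length then path.getD i "" else path.getLastD ""))

-- ===== PRECONDITION & SPEC =====
-- Pre_ excludes paths = [] (Python's max raises ValueError) and inputs mixing an empty
-- member path with a nonempty one, where A returns tuples containing None — not a value
-- of the declared List String type.
def Pre_combine_paths_py (paths : List (List String)) : Prop :=
  paths ≠ [] ∧ ((∀ p ∈ paths, p ≠ []) ∨ (∀ p ∈ paths, p = []))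
instance (paths : List (List String)) : Decidable (Pre_combine_paths_py paths) := by
  unfold Pre_combine_paths_py; infer_instance

def pvWitness_combine_paths_py : List (List String) := [["a", "b"], ["c"]]

def Spec_combine_paths_py (paths : List (List String)) (out : List (List String)) : Prop := out = combine_paths_py_alt paths
instance (paths : List (List String)) (out : List (List String)) : Decidable (Spec_combine_paths_py paths out) := by unfold Spec_combine_paths_py; infer_instance

-- ===== CLAIM (what is proved, stated in full; the proofs are below) =====
def Claim_equal_combine_paths_py : Prop := ∀ (paths : List (List String)), Dom_combine_paths_py paths → Pre_combine_paths_py paths → Spec_combine_paths_py paths (combine_paths_py paths)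

-- ===== LEMMAS AND PROOFS =====

-- zip(*rows) on a nonempty family of equal-length rows is the column-by-column build.
theorem pyZipStar_eq_columns (n : Nat) :
    ∀ (rows : List (List String)), rows ≠ [] → (∀ r ∈ rows, r.length = n) →
    pyZipStar rows = (List.range n).map (fun i => rows.map (fun r => r.getD i "")) := by
  induction n with
  | zero =>
    intro rows hne hlen
    match rows with
    | [] => exact absurd rfl hne
    | r :: rs =>
      have hr : r = [] := List.eq_nil_of_length_eq_zero (hlen r (by simp))
      unfold pyZipStar
      simp [hr]
  | succ n ih =>
    intro rows hne hlen
    match rows with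
    | [] => exact absurd rfl hne
    | r :: rs =>
      have hnoempty : ∀ x ∈ r :: rs, x ≠ [] := by
        intro x hx h
        have := hlen x hx; simp [h] at this
      have hany : ((r :: rs).any (·.isEmpty)) = false := by
        simp only [List.any_eq_false]
        intro x hx
        simpa [List.isEmpty_iff] using hnoempty x hx
      unfold pyZipStar
      rw [hany]
      simp only [Bool.false_eq_true, if_false]
      have htails : ∀ t ∈ (r :: rs).map (·.tail), t.length = n := by
        intro t ht
        rcases List.mem_map.mp ht with ⟨x, hx, rfl⟩
        have := hlen x hx
        rcases List.exists_cons_of_ne_nil (hnoempty x hx) with ⟨a, t', rfl⟩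
        simpa using this
      have := ih ((r :: rs).map (·.tail)) (by simp) htails
      rw [this, List.range_succ_eq_map]
      simp only [List.map_cons, List.map_map, List.cons_eq_cons]
      obtain ⟨a, t, rfl⟩ := List.exists_cons_of_ne_nil (hnoempty r (by simp))
      refine ⟨⟨rfl, ?_⟩, ?_⟩
      · -- column 0: headD = getD 0
        apply List.map_congr_left
        intro x hx
        obtain ⟨b, u, rfl⟩ := List.exists_cons_of_ne_nil (hnoempty x (by simp [hx]))
        rfl
      · -- later columns: tail.getD i = getD (i+1)
        apply List.map_congr_left
        intro i _
        simp only [Function.comp, List.cons_eq_cons]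
        refine ⟨rfl, ?_⟩
        apply List.map_congr_left
        intro x hx
        obtain ⟨b, u, rfl⟩ := List.exists_cons_of_ne_nil (hnoempty x (by simp [hx]))
        rfl

theorem le_max_of_mem_map_length {paths : List (List String)} {p : List String}
    (hp : p ∈ paths) : p.length ≤ ((paths.map (·.length)).max?).getD 0 := by
  have hmem : p.length ∈ paths.map (·.length) := List.mem_map.mpr ⟨p, hp, rfl⟩
  rcases hx : (paths.map (·.length)).max? with _ | m
  · exact absurd hmem (by simp [List.max?_eq_none_iff.mp hx])
  · have := (List.max?_eq_some_iff.mp hx).2 _ hmem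
    simpa [hx] using this

theorem padded_getD (p : List String) (m i : Nat) (hpm : p.length ≤ m) (hi : i < m) :
    (p ++ List.replicate (m - p.length) (p.getLastD "")).getD i "" =
      (if i < p.length then p.getD i "" else p.getLastD "") := by
  by_cases h : i < p.length
  · simp [h, List.getD_eq_getElem?_getD, List.getElem?_append_left h]
  · have hge : p.length ≤ i := Nat.le_of_not_lt h
    have : i - p.length < m - p.length := by omega
    simp [h, List.getD_eq_getElem?_getD, List.getElem?_append_right hge, this]

-- ===== VERDICT (by name: the statement is the Claim_ definition above) =====
theorem combine_paths_py_spec : Claim_equal_combine_paths_py := by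
  intro paths _ hpre
  obtain ⟨hne, _⟩ := hpre
  unfold Spec_combine_paths_py combine_paths_py combine_paths_py_alt
  set m : Nat := ((paths.map (·.length)).max?).getD 0 with hm
  have hpadne : paths.map (fun path => path ++ List.replicate (m - path.length) (path.getLastD "")) ≠ [] := by
    simpa using hne
  have hplen : ∀ r ∈ paths.map (fun path => path ++ List.replicate (m - path.length) (path.getLastD "")), r.length = m := by
    intro r hr
    rcases List.mem_map.mp hr with ⟨p, hp, rfl⟩
    have := le_max_of_mem_map_length hp
    simp [List.length_append]; omega
  rw [pyZipStar_eq_columns m _ hpadne hplen]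
  apply List.map_congr_left
  intro i hi
  rw [List.map_map]
  apply List.map_congr_left
  intro p hp
  exact padded_getD p m i (le_max_of_mem_map_length hp) (List.mem_range.mp hi)
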